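-- pv_equiv track=rewrite | github.com/SiuSte01/mv_utilities | aggr/ina/inaHotfix/inaHotfix.py | getBaseName
-- ===== SOURCE A (Python) =====
-- def getBaseName(inaName,inaDir,inaMap,offset=0):
-- 	if offset == 0:
-- 		if inaName not in inaMap.keys():
-- 			return inaName
-- 		elif inaMap[inaName] == inaDir:
-- 			return inaName
-- 		else:
-- 			return getBaseName(inaName=inaName,inaDir=inaDir,inaMap=inaMap,offset=offset+1)
-- 	else:
-- 		if inaName + str(offset) not in inaMap.keys():
-- 			return inaName + str(offset)
-- 		elif inaMap[inaName + str(offset)] == inaDir: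
-- 			return inaName + str(offset)
-- 		else:
-- 			return getBaseName(inaName=inaName,inaDir=inaDir,inaMap=inaMap,offset=offset+1)
-- ===== SOURCE B (Python) =====
-- def getBaseName(inaName, inaDir, inaMap, offset=0):
--     off = offset
--     while True:
--         candidate = inaName if off == 0 else inaName + str(off)
--         if candidate not in inaMap or inaMap[candidate] == inaDir:
--             return candidate
--         off += 1
-- ===== Notes on version B (the rewrite author's own statement) =====
-- stated objective: simpler
-- what changed: Replaces the self-recursive function with a single while-loop that builds the candidate name once per iteration instead of duplicating the probe logic across the offset==0 / offset!=0 branches.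
import Mathlib
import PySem

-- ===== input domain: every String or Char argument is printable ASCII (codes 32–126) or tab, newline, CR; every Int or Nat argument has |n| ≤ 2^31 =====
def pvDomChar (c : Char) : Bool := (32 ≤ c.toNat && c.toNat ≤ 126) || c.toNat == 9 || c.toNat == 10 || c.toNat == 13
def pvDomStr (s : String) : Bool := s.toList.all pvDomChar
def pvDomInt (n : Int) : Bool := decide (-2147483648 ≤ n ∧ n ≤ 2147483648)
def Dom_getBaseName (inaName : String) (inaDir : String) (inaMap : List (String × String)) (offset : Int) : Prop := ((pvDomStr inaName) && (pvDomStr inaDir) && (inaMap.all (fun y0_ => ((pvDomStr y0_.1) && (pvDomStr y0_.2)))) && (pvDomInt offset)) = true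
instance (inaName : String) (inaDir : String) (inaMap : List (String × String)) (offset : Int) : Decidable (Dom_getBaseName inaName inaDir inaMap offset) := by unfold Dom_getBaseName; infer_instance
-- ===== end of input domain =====

-- B replaces A's self-recursion (with its duplicated offset==0 / offset!=0 probe branches)
-- by a single while-loop building one candidate per iteration; objective: simpler.
-- Both ports use a fuel counter (inaMap.length + 1) only to make the same recursion/loop total:
-- the probed candidates are pairwise distinct, so within |inaMap| + 1 probes one misses the map
-- and the Python always returns before the fuel is exhausted.

-- ===== PORT A =====
-- recursive helper: A's body, step for step; fuel = remaining allowed recursive calls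
def getBaseNameGo (inaName : String) (inaDir : String) (inaMap : List (String × String)) (offset : Int) : Nat → String
  | 0 => inaName  -- fuel exhaustion (unreachable from the wrapper's fuel)
  | fuel + 1 =>
    if offset = 0 then
      match (PySem.Dict.mk inaMap).get? inaName with
      | none => inaName
      | some v =>
        if v = inaDir then inaName
        else getBaseNameGo inaName inaDir inaMap (offset + 1) fuel
    else
      match (PySem.Dict.mk inaMap).get? (inaName ++ PySem.Int.toStr offset) with
      | none => inaName ++ PySem.Int.toStr offset
      | some v =>
        if v = inaDir then inaName ++ PySem.Int.toStr offset
        else getBaseNameGo inaName inaDir inaMap (offset + 1) fuel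

def getBaseName (inaName : String) (inaDir : String) (inaMap : List (String × String)) (offset : Int) : String :=
  getBaseNameGo inaName inaDir inaMap offset (inaMap.length + 1)

-- ===== PORT B =====
-- loop helper: B's while-loop, one candidate per iteration; same fuel guard
def getBaseNameLoop (inaName : String) (inaDir : String) (inaMap : List (String × String)) (off : Int) : Nat → String
  | 0 => inaName  -- fuel exhaustion (unreachable from the wrapper's fuel)
  | fuel + 1 =>
    let candidate := if off = 0 then inaName else inaName ++ PySem.Int.toStr off
    -- 'candidate not in inaMap or inaMap[candidate] == inaDir'
    if ((PySem.Dict.mk inaMap).get? candidate).elim true (· = inaDir) then candidate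
    else getBaseNameLoop inaName inaDir inaMap (off + 1) fuel

def getBaseName_alt (inaName : String) (inaDir : String) (inaMap : List (String × String)) (offset : Int) : String :=
  getBaseNameLoop inaName inaDir inaMap offset (inaMap.length + 1)

-- ===== PRECONDITION & SPEC =====
def Spec_getBaseName (inaName : String) (inaDir : String) (inaMap : List (String × String)) (offset : Int) (out : String) : Prop := out = getBaseName_alt inaName inaDir inaMap offset
instance (inaName : String) (inaDir : String) (inaMap : List (String × String)) (offset : Int) (out : String) : Decidable (Spec_getBaseName inaName inaDir inaMap offset out) := by unfold Spec_getBaseName; infer_instance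

-- ===== CLAIM (what is proved, stated in full; the proofs are below) =====
def Claim_equal_getBaseName : Prop := ∀ (inaName : String) (inaDir : String) (inaMap : List (String × String)) (offset : Int), Dom_getBaseName inaName inaDir inaMap offset → Spec_getBaseName inaName inaDir inaMap offset (getBaseName inaName inaDir inaMap offset)

-- ===== LEMMAS AND PROOFS =====
theorem getBaseNameGo_eq_loop (inaName inaDir : String) (inaMap : List (String × String)) :
    ∀ (fuel : Nat) (offset : Int),
      getBaseNameGo inaName inaDir inaMap offset fuel = getBaseNameLoop inaName inaDir inaMap offset fuel := by
  intro fuel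
  induction fuel with
  | zero => intro offset; rfl
  | succ n ih =>
    intro offset
    by_cases h : offset = 0
    · subst h
      simp only [getBaseNameGo, getBaseNameLoop]
      cases hm : (PySem.Dict.mk inaMap).get? inaName with
      | none => simp [hm]
      | some v =>
        by_cases hv : v = inaDir
        · simp [hm, hv]
        · simp [hm, hv, ih]
    · simp only [getBaseNameGo, getBaseNameLoop, if_neg h]
      cases hm : (PySem.Dict.mk inaMap).get? (inaName ++ PySem.Int.toStr offset) with
      | none => simp [hm]
      | some v =>
        by_cases hv : v = inaDir
        · simp [hm, hv]
        · simp [hm, hv, ih]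

-- ===== VERDICT (by name: the statement is the Claim_ definition above) =====
theorem getBaseName_spec : Claim_equal_getBaseName := by
  intro inaName inaDir inaMap offset _
  unfold Spec_getBaseName getBaseName getBaseName_alt
  exact getBaseNameGo_eq_loop inaName inaDir inaMap _ offset
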